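-- pv_equiv track=rewrite | github.com/tainenko/Leetcode2019 | leetcode/editor/en/[2832]Maximal Range That Each Element Is Maximum in It.py | maximumLengthOfRanges
-- ===== SOURCE A (Python) =====
-- from typing import List
--
-- def maximumLengthOfRanges(nums: List[int]) -> List[int]:
--     n = len(nums)
--     left = [-1] * n
--     right = [n] * n
--     stack = []
--     for i in range(n):
--         while stack and nums[stack[-1]] <= nums[i]:
--             stack.pop()
--         if stack:
--             left[i] = stack[-1]
--         stack.append(i)
--
--     stack = []
--     for i in range(n - 1, -1, -1):
--         while stack and nums[stack[-1]] <= nums[i]: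
--             stack.pop()
--         if stack:
--             right[i] = stack[-1]
--         stack.append(i)
--     return [r - l - 1 for r, l in zip(right, left)]
-- ===== SOURCE B (Python) =====
-- from typing import List
--
-- def maximumLengthOfRanges(nums: List[int]) -> List[int]:
--     n = len(nums)
--     res = []
--     for i in range(n):
--         l = i - 1
--         while l >= 0 and nums[l] <= nums[i]:
--             l -= 1
--         r = i + 1
--         while r < n and nums[r] <= nums[i]:
--             r += 1
--         res.append(r - l - 1)
--     return res
-- ===== Notes on version B (the rewrite author's own statement) =====
-- stated objective: simpler
-- what changed: Replaces the two global monotone-stack passes over index arrays with a single pass that, for each element, scans left and right directly for the nearest strictly greater neighbour.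
import Mathlib
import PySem

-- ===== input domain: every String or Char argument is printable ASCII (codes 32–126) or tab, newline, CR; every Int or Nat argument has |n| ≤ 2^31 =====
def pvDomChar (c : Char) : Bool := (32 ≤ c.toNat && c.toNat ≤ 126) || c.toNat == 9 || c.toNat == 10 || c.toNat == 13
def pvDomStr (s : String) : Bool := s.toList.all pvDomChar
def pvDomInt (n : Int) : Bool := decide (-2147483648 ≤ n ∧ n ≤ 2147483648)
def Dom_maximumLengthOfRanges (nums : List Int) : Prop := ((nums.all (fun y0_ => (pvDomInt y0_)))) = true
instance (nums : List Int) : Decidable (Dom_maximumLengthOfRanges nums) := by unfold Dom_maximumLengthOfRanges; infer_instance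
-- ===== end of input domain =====

-- B replaces A's two monotone-stack passes by a direct per-element two-sided scan: simpler, not faster.

-- ===== PORT A =====
-- one monotone-stack loop body, shared by A's two symmetric loops (stack head = Python stack top;
-- the while+pop is dropWhile; indices pushed are valid, so nums.getD j 0 is exactly nums[j])
def pvStep (nums : List Int) (st : List Int × List Nat) (i : Nat) : List Int × List Nat :=
  let stack' := st.2.dropWhile (fun j => decide (nums.getD j 0 ≤ nums.getD i 0))
  let arr' := match stack' with
    | [] => st.1
    | t :: _ => st.1.set i (t : Int)
  (arr', i :: stack')

def maximumLengthOfRanges (nums : List Int) : List Int :=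
  let n := nums.length
  let left := ((List.range n).foldl (pvStep nums) (List.replicate n (-1), [])).1
  let right := ((List.range n).reverse.foldl (pvStep nums) (List.replicate n (n : Int), [])).1
  List.zipWith (fun r l => r - l - 1) right left

-- ===== PORT B =====
-- scan l = i-1, i-2, … while nums[l] ≤ x; result is the stopping index (or -1)
def pvScanDown (nums : List Int) (x : Int) : Nat → Int
  | 0 => -1
  | l + 1 => if nums.getD l 0 ≤ x then pvScanDown nums x l else (l : Int)

-- scan r = i+1, i+2, … while r < n and nums[r] ≤ x; result is the stopping index (or n)
def pvScanUp (nums : List Int) (x : Int) (n r : Nat) : Int :=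
  if r < n then (if nums.getD r 0 ≤ x then pvScanUp nums x n (r + 1) else (r : Int)) else (n : Int)
  termination_by n - r

def maximumLengthOfRanges_alt (nums : List Int) : List Int :=
  let n := nums.length
  (List.range n).map (fun i =>
    pvScanUp nums (nums.getD i 0) n (i + 1) - pvScanDown nums (nums.getD i 0) i - 1)

-- ===== PRECONDITION & SPEC =====
def Spec_maximumLengthOfRanges (nums : List Int) (out : List Int) : Prop := out = maximumLengthOfRanges_alt nums
instance (nums : List Int) (out : List Int) : Decidable (Spec_maximumLengthOfRanges nums out) := by unfold Spec_maximumLengthOfRanges; infer_instance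

-- ===== CLAIM (what is proved, stated in full; the proofs are below) =====
def Claim_equal_maximumLengthOfRanges : Prop := ∀ (nums : List Int), Dom_maximumLengthOfRanges nums → Spec_maximumLengthOfRanges nums (maximumLengthOfRanges nums)

-- ===== LEMMAS AND PROOFS =====

-- characterisations of B's scans
lemma scanDown_eq (nums : List Int) (x : Int) (t i : Nat) (ht : t < i)
    (hgt : ¬ nums.getD t 0 ≤ x)
    (hmid : ∀ j, t < j → j < i → nums.getD j 0 ≤ x) :
    pvScanDown nums x i = (t : Int) := by
  induction i with
  | zero => omega
  | succ l ih =>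
    by_cases h : l = t
    · subst h; simp only [pvScanDown, if_neg hgt]
    · have : nums.getD l 0 ≤ x := hmid l (by omega) (by omega)
      simp only [pvScanDown, if_pos this]
      exact ih (by omega) (fun j h1 h2 => hmid j h1 (by omega))

lemma scanDown_none (nums : List Int) (x : Int) (i : Nat)
    (h : ∀ j, j < i → nums.getD j 0 ≤ x) :
    pvScanDown nums x i = -1 := by
  induction i with
  | zero => simp [pvScanDown]
  | succ l ih =>
    simp only [pvScanDown, if_pos (h l (by omega))]
    exact ih (fun j hj => h j (by omega))

lemma scanUp_eq (nums : List Int) (x : Int) (n t : Nat) (htn : t < n)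
    (hgt : ¬ nums.getD t 0 ≤ x) :
    ∀ k r, t - r = k → r ≤ t → (∀ j, r ≤ j → j < t → nums.getD j 0 ≤ x) →
    pvScanUp nums x n r = (t : Int) := by
  intro k
  induction k with
  | zero =>
    intro r hk hr _
    have : r = t := by omega
    subst this
    rw [pvScanUp, if_pos htn, if_neg hgt]
  | succ m ih =>
    intro r hk hr hmid
    have h1 : nums.getD r 0 ≤ x := hmid r le_rfl (by omega)
    rw [pvScanUp, if_pos (by omega : r < n), if_pos h1]
    exact ih (r + 1) (by omega) (by omega) (fun j h1 h2 => hmid j (by omega) h2)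

lemma scanUp_none (nums : List Int) (x : Int) (n : Nat) :
    ∀ k r, n - r = k → (∀ j, r ≤ j → j < n → nums.getD j 0 ≤ x) →
    pvScanUp nums x n r = (n : Int) := by
  intro k
  induction k with
  | zero =>
    intro r hk _
    rw [pvScanUp, if_neg (by omega : ¬ r < n)]
  | succ m ih =>
    intro r hk h
    rw [pvScanUp, if_pos (by omega : r < n), if_pos (h r le_rfl (by omega))]
    exact ih (r + 1) (by omega) (fun j h1 h2 => h j (by omega) h2)

-- helper: head of a dropWhile fails the predicate
lemma dropWhile_head_false {α : Type} (p : α → Bool) (l : List α) (t : α) (r : List α)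
    (h : l.dropWhile p = t :: r) : p t = false := by
  induction l with
  | nil => simp at h
  | cons a l ih =>
    by_cases ha : p a
    · rw [List.dropWhile_cons_of_pos ha] at h; exact ih h
    · rw [List.dropWhile_cons_of_neg ha] at h
      cases h; simpa using ha

-- definitional projections of pvStep, used by the invariant proofs
lemma pvStep_fst (nums : List Int) (st : List Int × List Nat) (i : Nat) :
    (pvStep nums st i).1 =
      match st.2.dropWhile (fun j => decide (nums.getD j 0 ≤ nums.getD i 0)) with
      | [] => st.1
      | t :: _ => st.1.set i (t : Int) := rfl

lemma pvStep_snd (nums : List Int) (st : List Int × List Nat) (i : Nat) :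
    (pvStep nums st i).2 =
      i :: st.2.dropWhile (fun j => decide (nums.getD j 0 ≤ nums.getD i 0)) := rfl

-- invariant of A's left-to-right pass, after processing indices [0, i)
def LInv (nums : List Int) (i : Nat) (st : List Int × List Nat) : Prop :=
  st.1 = (List.range nums.length).map
      (fun j => if j < i then pvScanDown nums (nums.getD j 0) j else -1)
  ∧ st.2.Pairwise (fun a b => b < a ∧ nums.getD a 0 < nums.getD b 0)
  ∧ (∀ m ∈ st.2, m < i)
  ∧ (∀ j, j < i → ∃ m ∈ st.2, j ≤ m ∧ nums.getD j 0 ≤ nums.getD m 0)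

-- invariant of A's right-to-left pass, after processing indices [k, n)
def RInv (nums : List Int) (k : Nat) (st : List Int × List Nat) : Prop :=
  st.1 = (List.range nums.length).map
      (fun j => if k ≤ j then pvScanUp nums (nums.getD j 0) nums.length (j + 1)
                else (nums.length : Int))
  ∧ st.2.Pairwise (fun a b => a < b ∧ nums.getD a 0 < nums.getD b 0)
  ∧ (∀ m ∈ st.2, k ≤ m ∧ m < nums.length)
  ∧ (∀ j, k ≤ j → j < nums.length → ∃ m ∈ st.2, m ≤ j ∧ nums.getD j 0 ≤ nums.getD m 0)

lemma LInv_step (nums : List Int) (i : Nat) (st : List Int × List Nat)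
    (hinv : LInv nums i st) (hi : i < nums.length) :
    LInv nums (i + 1) (pvStep nums st i) := by
  obtain ⟨harr, hpair, hlt, hdom⟩ := hinv
  set p : Nat → Bool := fun j => decide (nums.getD j 0 ≤ nums.getD i 0) with hp
  have hsplit : st.2.takeWhile p ++ st.2.dropWhile p = st.2 := List.takeWhile_append_dropWhile
  have htake : ∀ m ∈ st.2.takeWhile p, nums.getD m 0 ≤ nums.getD i 0 := by
    intro m hm
    have := List.mem_takeWhile_imp hm
    simpa [hp] using this
  have hsub : List.Sublist (st.2.dropWhile p) st.2 := List.dropWhile_sublist p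
  have hmemdrop : ∀ m ∈ st.2.dropWhile p, m ∈ st.2 := fun m hm => hsub.mem hm
  have hpair' : (st.2.dropWhile p).Pairwise (fun a b => b < a ∧ nums.getD a 0 < nums.getD b 0) :=
    List.Pairwise.sublist hsub hpair
  -- every surviving stack element has a strictly greater value than nums[i]
  have hgtall : ∀ b ∈ st.2.dropWhile p, nums.getD i 0 < nums.getD b 0 := by
    cases hdw : st.2.dropWhile p with
    | nil => intro b hb; simp at hb
    | cons t rest =>
      have ht : ¬ nums.getD t 0 ≤ nums.getD i 0 := by
        have := dropWhile_head_false p st.2 t rest hdw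
        simpa [hp] using this
      intro b hb
      rcases List.mem_cons.mp hb with hb | hb
      · subst hb; omega
      · have := (List.pairwise_cons.mp (hdw ▸ hpair')).1 b hb
        omega
  -- new stack facts
  have hlt' : ∀ m ∈ (pvStep nums st i).2, m < i + 1 := by
    intro m hm
    rw [pvStep_snd, ← hp] at hm
    rcases List.mem_cons.mp hm with hm | hm
    · omega
    · exact Nat.lt_succ_of_lt (hlt m (hmemdrop m hm))
  have hpairnew : (pvStep nums st i).2.Pairwise
      (fun a b => b < a ∧ nums.getD a 0 < nums.getD b 0) := by
    rw [pvStep_snd, ← hp]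
    refine List.pairwise_cons.mpr ⟨?_, hpair'⟩
    intro b hb
    exact ⟨hlt b (hmemdrop b hb), hgtall b hb⟩
  have hdomnew : ∀ j, j < i + 1 → ∃ m ∈ (pvStep nums st i).2,
      j ≤ m ∧ nums.getD j 0 ≤ nums.getD m 0 := by
    intro j hj
    by_cases hji : j = i
    · subst hji
      exact ⟨j, by rw [pvStep_snd]; exact List.mem_cons_self .., le_rfl, le_rfl⟩
    · obtain ⟨m, hm, hjm, hgm⟩ := hdom j (by omega)
      rw [← hsplit] at hm
      rcases List.mem_append.mp hm with hm | hm
      · exact ⟨i, by rw [pvStep_snd]; exact List.mem_cons_self .., by omega,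
          le_trans hgm (htake m hm)⟩
      · exact ⟨m, by rw [pvStep_snd, ← hp]; exact List.mem_cons_of_mem _ hm, hjm, hgm⟩
  refine ⟨?_, hpairnew, hlt', hdomnew⟩
  -- the array component
  cases hdw : st.2.dropWhile p with
  | nil =>
    -- everything ≤ nums[i]: scanDown yields -1, array unchanged
    have hall : ∀ j, j < i → nums.getD j 0 ≤ nums.getD i 0 := by
      intro j hj
      obtain ⟨m, hm, _, hgm⟩ := hdom j hj
      rw [← hsplit, hdw, List.append_nil] at hm
      exact le_trans hgm (htake m hm)
    have hscan0 : pvScanDown nums (nums.getD i 0) i = -1 := scanDown_none _ _ _ hall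
    rw [pvStep_fst, ← hp, hdw]
    change st.1 = _
    rw [harr]
    apply List.map_congr_left
    intro j hj
    rcases Nat.lt_trichotomy j i with h | h | h
    · simp only [if_pos h, if_pos (by omega : j < i + 1)]
    · subst h
      simp only [if_neg (by omega : ¬ j < j), if_pos (by omega : j < j + 1), hscan0]
    · simp only [if_neg (by omega : ¬ j < i), if_neg (by omega : ¬ j < i + 1)]
  | cons t rest =>
    have htmem : t ∈ st.2 := hmemdrop t (by simp [hdw])
    have hti : t < i := hlt t htmem
    have ht : ¬ nums.getD t 0 ≤ nums.getD i 0 := by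
      have := dropWhile_head_false p st.2 t rest hdw
      simpa [hp] using this
    have hmid : ∀ j, t < j → j < i → nums.getD j 0 ≤ nums.getD i 0 := by
      intro j hj1 hj2
      obtain ⟨m, hm, hjm, hgm⟩ := hdom j hj2
      rw [← hsplit] at hm
      rcases List.mem_append.mp hm with hm | hm
      · exact le_trans hgm (htake m hm)
      · rw [hdw] at hm
        rcases List.mem_cons.mp hm with hm | hm
        · omega
        · have := (List.pairwise_cons.mp (hdw ▸ hpair')).1 m hm
          omega
    have hscan : pvScanDown nums (nums.getD i 0) i = (t : Int) :=
      scanDown_eq nums _ t i hti ht hmid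
    rw [pvStep_fst, ← hp, hdw]
    change st.1.set _ _ = _
    rw [harr]
    refine List.ext_getElem (by simp) ?_
    intro k h1 h2
    have hk : k < nums.length := by simpa using h2
    simp only [List.getElem_set, List.getElem_map, List.getElem_range]
    by_cases hik : i = k
    · subst hik
      rw [if_pos rfl, if_pos (by omega : i < i + 1), hscan]
    · rw [if_neg hik]
      split_ifs <;> first | rfl | omega

lemma RInv_step (nums : List Int) (k : Nat) (st : List Int × List Nat)
    (hinv : RInv nums (k + 1) st) (hk : k < nums.length) :
    RInv nums k (pvStep nums st k) := by
  obtain ⟨harr, hpair, hlt, hdom⟩ := hinv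
  set p : Nat → Bool := fun j => decide (nums.getD j 0 ≤ nums.getD k 0) with hp
  have hsplit : st.2.takeWhile p ++ st.2.dropWhile p = st.2 := List.takeWhile_append_dropWhile
  have htake : ∀ m ∈ st.2.takeWhile p, nums.getD m 0 ≤ nums.getD k 0 := by
    intro m hm
    have := List.mem_takeWhile_imp hm
    simpa [hp] using this
  have hsub : List.Sublist (st.2.dropWhile p) st.2 := List.dropWhile_sublist p
  have hmemdrop : ∀ m ∈ st.2.dropWhile p, m ∈ st.2 := fun m hm => hsub.mem hm
  have hpair' : (st.2.dropWhile p).Pairwise (fun a b => a < b ∧ nums.getD a 0 < nums.getD b 0) :=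
    List.Pairwise.sublist hsub hpair
  have hgtall : ∀ b ∈ st.2.dropWhile p, nums.getD k 0 < nums.getD b 0 := by
    cases hdw : st.2.dropWhile p with
    | nil => intro b hb; simp at hb
    | cons t rest =>
      have ht : ¬ nums.getD t 0 ≤ nums.getD k 0 := by
        have := dropWhile_head_false p st.2 t rest hdw
        simpa [hp] using this
      intro b hb
      rcases List.mem_cons.mp hb with hb | hb
      · subst hb; omega
      · have := (List.pairwise_cons.mp (hdw ▸ hpair')).1 b hb
        omega
  have hlt' : ∀ m ∈ (pvStep nums st k).2, k ≤ m ∧ m < nums.length := by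
    intro m hm
    rw [pvStep_snd, ← hp] at hm
    rcases List.mem_cons.mp hm with hm | hm
    · omega
    · have := hlt m (hmemdrop m hm)
      omega
  have hpairnew : (pvStep nums st k).2.Pairwise
      (fun a b => a < b ∧ nums.getD a 0 < nums.getD b 0) := by
    rw [pvStep_snd, ← hp]
    refine List.pairwise_cons.mpr ⟨?_, hpair'⟩
    intro b hb
    have := hlt b (hmemdrop b hb)
    exact ⟨by omega, hgtall b hb⟩
  have hdomnew : ∀ j, k ≤ j → j < nums.length → ∃ m ∈ (pvStep nums st k).2,
      m ≤ j ∧ nums.getD j 0 ≤ nums.getD m 0 := by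
    intro j hj hjn
    by_cases hjk : j = k
    · subst hjk
      exact ⟨j, by rw [pvStep_snd]; exact List.mem_cons_self .., le_rfl, le_rfl⟩
    · obtain ⟨m, hm, hjm, hgm⟩ := hdom j (by omega) hjn
      rw [← hsplit] at hm
      rcases List.mem_append.mp hm with hm | hm
      · exact ⟨k, by rw [pvStep_snd]; exact List.mem_cons_self .., by omega,
          le_trans hgm (htake m hm)⟩
      · exact ⟨m, by rw [pvStep_snd, ← hp]; exact List.mem_cons_of_mem _ hm, hjm, hgm⟩
  refine ⟨?_, hpairnew, hlt', hdomnew⟩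
  cases hdw : st.2.dropWhile p with
  | nil =>
    have hall : ∀ j, k + 1 ≤ j → j < nums.length → nums.getD j 0 ≤ nums.getD k 0 := by
      intro j hj hjn
      obtain ⟨m, hm, _, hgm⟩ := hdom j hj hjn
      rw [← hsplit, hdw, List.append_nil] at hm
      exact le_trans hgm (htake m hm)
    have hscan0 : pvScanUp nums (nums.getD k 0) nums.length (k + 1) = (nums.length : Int) :=
      scanUp_none nums _ nums.length (nums.length - (k + 1)) (k + 1) rfl hall
    rw [pvStep_fst, ← hp, hdw]
    change st.1 = _
    rw [harr]
    apply List.map_congr_left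
    intro j hj
    rcases Nat.lt_trichotomy j k with h | h | h
    · simp only [if_neg (by omega : ¬ k + 1 ≤ j), if_neg (by omega : ¬ k ≤ j)]
    · subst h
      simp only [if_neg (by omega : ¬ j + 1 ≤ j), if_pos (by omega : j ≤ j), hscan0]
    · simp only [if_pos (by omega : k + 1 ≤ j), if_pos (by omega : k ≤ j)]
  | cons t rest =>
    have htmem : t ∈ st.2 := hmemdrop t (by simp [hdw])
    have hti : k + 1 ≤ t ∧ t < nums.length := hlt t htmem
    have ht : ¬ nums.getD t 0 ≤ nums.getD k 0 := by
      have := dropWhile_head_false p st.2 t rest hdw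
      simpa [hp] using this
    have hmid : ∀ j, k + 1 ≤ j → j < t → nums.getD j 0 ≤ nums.getD k 0 := by
      intro j hj1 hj2
      obtain ⟨m, hm, hjm, hgm⟩ := hdom j hj1 (by omega)
      rw [← hsplit] at hm
      rcases List.mem_append.mp hm with hm | hm
      · exact le_trans hgm (htake m hm)
      · rw [hdw] at hm
        rcases List.mem_cons.mp hm with hm | hm
        · omega
        · have := (List.pairwise_cons.mp (hdw ▸ hpair')).1 m hm
          omega
    have hscan : pvScanUp nums (nums.getD k 0) nums.length (k + 1) = (t : Int) :=
      scanUp_eq nums _ nums.length t hti.2 ht (t - (k + 1)) (k + 1) rfl hti.1 hmid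
    rw [pvStep_fst, ← hp, hdw]
    change st.1.set _ _ = _
    rw [harr]
    refine List.ext_getElem (by simp) ?_
    intro j h1 h2
    have hj : j < nums.length := by simpa using h2
    simp only [List.getElem_set, List.getElem_map, List.getElem_range]
    by_cases hkj : k = j
    · subst hkj
      rw [if_pos rfl, if_pos (by omega : k ≤ k), hscan]
    · rw [if_neg hkj]
      split_ifs <;> first | rfl | omega

lemma left_final (nums : List Int) :
    ((List.range nums.length).foldl (pvStep nums) (List.replicate nums.length (-1), [])).1
      = (List.range nums.length).map (fun j => pvScanDown nums (nums.getD j 0) j) := by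
  have key : ∀ i, i ≤ nums.length →
      LInv nums i ((List.range i).foldl (pvStep nums) (List.replicate nums.length (-1), [])) := by
    intro i
    induction i with
    | zero =>
      intro _
      refine ⟨?_, by simp, by simp, fun j hj => absurd hj (Nat.not_lt_zero j)⟩
      simp only [List.range_zero, List.foldl_nil]
      rw [show (fun j => if j < 0 then pvScanDown nums (nums.getD j 0) j else (-1 : Int))
            = fun _ => (-1 : Int) by funext j; simp]
      rw [List.map_const', List.length_range]
    | succ i ih =>
      intro hi
      rw [List.range_succ, List.foldl_append, List.foldl_cons, List.foldl_nil]
      exact LInv_step nums i _ (ih (by omega)) (by omega)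
  have h := (key nums.length le_rfl).1
  rw [h]
  apply List.map_congr_left
  intro j hj
  rw [if_pos (List.mem_range.mp hj)]

lemma right_final (nums : List Int) :
    ((List.range nums.length).reverse.foldl (pvStep nums)
        (List.replicate nums.length ((nums.length : Int)), [])).1
      = (List.range nums.length).map
          (fun j => pvScanUp nums (nums.getD j 0) nums.length (j + 1)) := by
  have key : ∀ d k, k + d = nums.length →
      RInv nums k (((List.range' k d).reverse).foldl (pvStep nums)
        (List.replicate nums.length ((nums.length : Int)), [])) := by
    intro d
    induction d with
    | zero =>
      intro k hk
      have hk' : k = nums.length := by omega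
      subst hk'
      refine ⟨?_, by simp, by simp, fun j h1 h2 => absurd h2 (by omega)⟩
      simp only [List.range'_zero, List.reverse_nil, List.foldl_nil]
      have h2 : (List.range nums.length).map
            (fun j => if nums.length ≤ j then pvScanUp nums (nums.getD j 0) nums.length (j + 1)
              else ((nums.length : Int)))
          = (List.range nums.length).map (fun _ => ((nums.length : Int))) :=
        List.map_congr_left (by
          intro j hj
          rw [if_neg (by have := List.mem_range.mp hj; omega)])
      rw [h2, List.map_const', List.length_range]
    | succ d ih =>
      intro k hk
      rw [List.range'_succ, List.reverse_cons, List.foldl_append, List.foldl_cons, List.foldl_nil]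
      exact RInv_step nums k _ (ih (k + 1) (by omega)) (by omega)
  have h := (key nums.length 0 (by omega)).1
  rw [← List.range_eq_range'] at h
  rw [h]
  apply List.map_congr_left
  intro j _
  rw [if_pos (Nat.zero_le j)]

lemma zipWith_map_map {α β γ δ : Type} (f : β → γ → δ) (g : α → β) (h : α → γ) (l : List α) :
    List.zipWith f (l.map g) (l.map h) = l.map (fun x => f (g x) (h x)) := by
  induction l with
  | nil => rfl
  | cons a l ih => simp [ih]

-- ===== VERDICT (by name: the statement is the Claim_ definition above) =====
theorem maximumLengthOfRanges_spec : Claim_equal_maximumLengthOfRanges := by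
  intro nums _
  show _ = _
  unfold maximumLengthOfRanges maximumLengthOfRanges_alt
  simp only [left_final, right_final, zipWith_map_map]
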